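-- pv_equiv track=rewrite | github.com/IlievaDayana/SOFTUNI | exams_advanced_2020/2_present_delivery.py | santa_pos
-- ===== SOURCE A (Python) =====
-- def santa_pos(field):
--     nice = 0
--     row, col = 0, 0
--     for q in range(len(field)):
--         for w in range(len(field[q])):
--             if field[q][w] == "S":
--                 row, col = q, w
--             elif field[q][w] == "V":
--                 nice += 1
--     return nice, row, col
-- ===== SOURCE B (Python) =====
-- def santa_pos(field):
--     # Count nice houses in one dedicated pass, then search for Santa
--     # backwards (row-major reversed) so the first hit found is the last "S".
--     nice = sum(1 for r in field for c in r if c == "V")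
--     for q in range(len(field) - 1, -1, -1):
--         r = field[q]
--         for w in range(len(r) - 1, -1, -1):
--             if r[w] == "S":
--                 return nice, q, w
--     return nice, 0, 0
-- ===== Notes on version B (the rewrite author's own statement) =====
-- stated objective: alternative
-- what changed: B splits the work into two passes: a comprehension-sum counting "V" cells, then a reversed row-major search that returns at the first "S" it meets (the last one in forward order, defaulting to (0,0)), instead of A's single fold that keeps overwriting position state.
import Mathlib
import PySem

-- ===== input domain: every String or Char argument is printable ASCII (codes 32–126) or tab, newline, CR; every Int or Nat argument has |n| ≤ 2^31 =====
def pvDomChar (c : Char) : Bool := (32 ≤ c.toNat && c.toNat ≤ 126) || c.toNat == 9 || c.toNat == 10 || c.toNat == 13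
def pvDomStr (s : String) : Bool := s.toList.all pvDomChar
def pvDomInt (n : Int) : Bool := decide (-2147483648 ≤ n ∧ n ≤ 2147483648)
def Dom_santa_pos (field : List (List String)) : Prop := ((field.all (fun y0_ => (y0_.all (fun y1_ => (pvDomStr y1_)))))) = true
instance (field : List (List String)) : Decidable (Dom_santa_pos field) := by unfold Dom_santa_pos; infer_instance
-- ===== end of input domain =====

-- B does the same work as A in two separate passes (count first, then a reversed
-- early-exit search for the last "S"); same O(n) cost, different decomposition.

-- ===== PORT A =====
-- single forward fold over (index, cell) pairs keeping (nice, row, col) state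
def santa_pos (field : List (List String)) : Int × Int × Int :=
  (PySem.List.enumerate field 0).foldl (fun st qr =>
    (PySem.List.enumerate qr.2 0).foldl (fun st wc =>
      if wc.2 == "S" then (st.1, qr.1, wc.1)
      else if wc.2 == "V" then (st.1 + 1, st.2.1, st.2.2)
      else st) st) ((0 : Int), (0 : Int), (0 : Int))

-- ===== PORT B =====
-- reversed search within one row: index of the LAST "S" (checks the tail first)
def pvLastSRow : List String → Option Int
  | [] => none
  | c :: rest =>
    match pvLastSRow rest with
    | some w => some (w + 1)
    | none => if c == "S" then some 0 else none

-- reversed row-major search over the grid: position of the LAST "S"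
def pvLastS : List (List String) → Option (Int × Int)
  | [] => none
  | r :: rest =>
    match pvLastS rest with
    | some p => some (p.1 + 1, p.2)
    | none => (pvLastSRow r).map (fun w => ((0 : Int), w))

def santa_pos_alt (field : List (List String)) : Int × Int × Int :=
  let nice : Int := (((field.flatMap id).countP (fun c => c == "V") : Nat) : Int)
  match pvLastS field with
  | some p => (nice, p.1, p.2)
  | none => (nice, 0, 0)

-- ===== PRECONDITION & SPEC =====
def Spec_santa_pos (field : List (List String)) (out : Int × Int × Int) : Prop := out = santa_pos_alt field
instance (field : List (List String)) (out : Int × Int × Int) : Decidable (Spec_santa_pos field out) := by unfold Spec_santa_pos; infer_instance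

-- ===== CLAIM (what is proved, stated in full; the proofs are below) =====
def Claim_equal_santa_pos : Prop := ∀ (field : List (List String)), Dom_santa_pos field → Spec_santa_pos field (santa_pos field)

-- ===== LEMMAS AND PROOFS =====

theorem santa_inner (row : List String) (s : Int) (q : Int) (st : Int × Int × Int) :
    (PySem.List.enumerate row s).foldl (fun st wc =>
      if wc.2 == "S" then (st.1, q, wc.1)
      else if wc.2 == "V" then (st.1 + 1, st.2.1, st.2.2)
      else st) st
    = (st.1 + ((row.countP (fun c => c == "V") : Nat) : Int),
       match pvLastSRow row with
       | some w => (q, s + w)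
       | none => st.2) := by
  induction row generalizing s st with
  | nil => simp [PySem.List.enumerate_nil, pvLastSRow]
  | cons c rest ih =>
    rw [PySem.List.enumerate_cons, List.foldl_cons, ih]
    simp only [pvLastSRow, List.countP_cons]
    by_cases hS : c == "S"
    · have hV : (c == "V") = false := by
        cases hb : c == "V"
        · rfl
        · exact absurd (by rw [(beq_iff_eq).mp hb] at hS; exact (beq_iff_eq).mp hS) (by decide)
      cases h : pvLastSRow rest with
      | none => simp [hS, hV]
      | some w => simp [hS, hV]; omega
    · cases h : pvLastSRow rest with
      | none =>
        by_cases hV : c == "V" <;> simp [hS, hV] <;> omega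
      | some w =>
        by_cases hV : c == "V" <;> simp [hS, hV] <;> omega

theorem santa_outer (rows : List (List String)) (s : Int) (st : Int × Int × Int) :
    (PySem.List.enumerate rows s).foldl (fun st qr =>
      (PySem.List.enumerate qr.2 0).foldl (fun st wc =>
        if wc.2 == "S" then (st.1, qr.1, wc.1)
        else if wc.2 == "V" then (st.1 + 1, st.2.1, st.2.2)
        else st) st) st
    = (st.1 + (((rows.flatMap id).countP (fun c => c == "V") : Nat) : Int),
       match pvLastS rows with
       | some p => (s + p.1, p.2)
       | none => st.2) := by
  induction rows generalizing s st with
  | nil => simp [pvLastS]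
  | cons r rest ih =>
    rw [PySem.List.enumerate_cons, List.foldl_cons, santa_inner, ih]
    simp only [pvLastS, List.flatMap_cons, id_eq, List.countP_append]
    cases hrest : pvLastS rest with
    | some p =>
      simp only [Prod.mk.injEq]
      push_cast
      and_intros <;> first | ring | trivial
    | none =>
      cases hrow : pvLastSRow r with
      | none => simp; ring
      | some w =>
        simp only [Option.map_some, Prod.mk.injEq]
        push_cast
        and_intros <;> ring


-- ===== VERDICT (by name: the statement is the Claim_ definition above) =====
theorem santa_pos_spec : Claim_equal_santa_pos := by
  intro field _
  unfold Spec_santa_pos santa_pos santa_pos_alt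
  rw [santa_outer]
  cases h : pvLastS field with
  | none => simp
  | some p => simp
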